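-- pv_equiv track=rewrite | github.com/emeuc3m/secure_codes | file_manager.py | del_enc_ext
-- ===== SOURCE A (Python) =====
-- def del_enc_ext(file):
--     # Delete the "enc" from the name and substitute it by "downloaded"
--     splitted = file.split("_")
--     extension = splitted[-1].split(".") # ["enc", file extension]
--     splitted[-1] = extension[1] # Change "enc.txt" for "txt"
--     dec_name = ""
--     n = len(splitted)
--     for ii in range(n):
--         if ii == n-1:
--             dec_name += "_downloaded."+splitted[ii]
--         elif ii==0:
--             dec_name += splitted[ii]
--         else:
--             dec_name += "_"+splitted[ii]
--
--     return dec_name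
-- ===== SOURCE B (Python) =====
-- def del_enc_ext(file):
--     # Split once at the final underscore; rpartition gives head='' when there
--     # is no underscore, so no branchy rebuild loop is needed.
--     head, _, tail = file.rpartition("_")
--     return head + "_downloaded." + tail.split(".")[1]
-- ===== Notes on version B (the rewrite author's own statement) =====
-- stated objective: simpler
-- what changed: B replaces the full split('_') into a list plus a branchy index loop that rejoins the pieces by a single rpartition at the last underscore: head + '_downloaded.' + tail.split('.')[1].
import Mathlib
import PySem

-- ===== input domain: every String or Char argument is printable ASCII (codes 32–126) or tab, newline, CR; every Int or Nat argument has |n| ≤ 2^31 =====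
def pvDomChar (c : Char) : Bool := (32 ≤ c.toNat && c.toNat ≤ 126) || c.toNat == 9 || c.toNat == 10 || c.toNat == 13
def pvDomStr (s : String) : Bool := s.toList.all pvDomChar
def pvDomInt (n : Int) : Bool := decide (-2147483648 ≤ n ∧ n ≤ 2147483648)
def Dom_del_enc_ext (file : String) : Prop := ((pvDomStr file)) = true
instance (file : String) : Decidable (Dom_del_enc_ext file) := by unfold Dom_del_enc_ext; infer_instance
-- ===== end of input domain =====

-- B splits once at the final underscore (rpartition) instead of splitting the
-- whole name into a list and rebuilding it with a branchy index loop: simpler.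

-- ===== PORT A =====
def del_enc_ext (file : String) : String :=
  let splitted := PySem.Chars.splitOn file.toList ['_']
  let extension := PySem.Chars.splitOn (PySem.List.pyGetD splitted (-1) []) ['.']
  let splitted := PySem.List.pySetD splitted (-1) (PySem.List.pyGetD extension 1 [])
  let n : Int := splitted.length
  let dec_name := (PySem.List.pyRange 0 n 1).foldl (fun acc ii =>
      if ii = n - 1 then acc ++ "_downloaded.".toList ++ PySem.List.pyGetD splitted ii []
      else if ii = 0 then acc ++ PySem.List.pyGetD splitted ii []
      else acc ++ '_' :: PySem.List.pyGetD splitted ii []) []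
  String.ofList dec_name

-- ===== PORT B =====
-- hand port of str.rpartition('_') (PySem has no rpartition); exact: some
-- (before-last-'_', after-last-'_') when '_' occurs, none otherwise.
def rpartU : List Char → Option (List Char × List Char)
  | [] => none
  | c :: rest =>
    match rpartU rest with
    | some (h, t) => some (c :: h, t)
    | none => if c = '_' then some ([], rest) else none

def del_enc_ext_alt (file : String) : String :=
  let ht := match rpartU file.toList with
    | some (h, t) => (h, t)
    | none => ([], file.toList)     -- rpartition: head = '' when no '_'
  String.ofList (ht.1 ++ "_downloaded.".toList
      ++ PySem.List.pyGetD (PySem.Chars.splitOn ht.2 ['.']) 1 [])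

-- ===== PRECONDITION & SPEC =====
-- Pre_ excludes exactly the inputs where the segment after the last '_' has no
-- '.' (including the empty string): there both Pythons raise IndexError.
def Pre_del_enc_ext (file : String) : Prop :=
  '.' ∈ file.toList.reverse.takeWhile (· ≠ '_')
instance (file : String) : Decidable (Pre_del_enc_ext file) := by
  unfold Pre_del_enc_ext; infer_instance
def pvWitness_del_enc_ext : String := "file_enc.txt"

def Spec_del_enc_ext (file : String) (out : String) : Prop := out = del_enc_ext_alt file
instance (file : String) (out : String) : Decidable (Spec_del_enc_ext file out) := by unfold Spec_del_enc_ext; infer_instance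

-- ===== CLAIM (what is proved, stated in full; the proofs are below) =====
def Claim_equal_del_enc_ext : Prop := ∀ (file : String), Dom_del_enc_ext file → Pre_del_enc_ext file → Spec_del_enc_ext file (del_enc_ext file)

-- ===== LEMMAS AND PROOFS =====

-- Reference single-character split: structural recursion on the string.
def splitC (c : Char) : List Char → List (List Char)
  | [] => [[]]
  | a :: rest =>
    if a = c then [] :: splitC c rest
    else
      match splitC c rest with
      | [] => [[a]]            -- unreachable: splitC never returns []
      | s :: ss => (a :: s) :: ss

theorem splitC_ne_nil (c : Char) (l : List Char) : splitC c l ≠ [] := by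
  cases l with
  | nil => simp [splitC]
  | cons a rest =>
    simp only [splitC]
    split
    · simp
    · split <;> simp

theorem splitOn_go_eq (c : Char) : ∀ (fuel : Nat) (l cur : List Char)
    (acc : List (List Char)), l.length < fuel →
    PySem.Chars.splitOn.go [c] fuel l cur acc =
      acc.reverse ++ (match splitC c l with
        | [] => []
        | s :: ss => (cur.reverse ++ s) :: ss) := by
  intro fuel
  induction fuel with
  | zero => intro l cur acc h; omega
  | succ fuel ih =>
    intro l cur acc h
    cases l with
    | nil => rw [PySem.Chars.splitOn.go.eq_def]; simp [splitC]
    | cons a rest =>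
      rw [PySem.Chars.splitOn.go.eq_def]
      simp only [List.isPrefixOf]
      by_cases hac : a = c
      · subst hac
        simp only [BEq.rfl, Bool.true_and, if_pos, List.length_cons, List.length_nil,
          Nat.zero_add, List.drop_succ_cons, List.drop_zero]
        rw [ih rest [] (cur.reverse :: acc) (by simp at h ⊢; omega)]
        have hne := splitC_ne_nil a rest
        cases hs : splitC a rest with
        | nil => exact absurd hs hne
        | cons s ss => simp [splitC, hs]
      · have : (c == a && true) = false := by simp; exact fun hca => hac hca.symm
        simp only [this, Bool.false_eq_true, if_neg, not_false_eq_true]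
        rw [ih rest (a :: cur) acc (by simp at h ⊢; omega)]
        have hne := splitC_ne_nil c rest
        cases hs : splitC c rest with
        | nil => exact absurd hs hne
        | cons s ss => simp [splitC, hac, hs]

theorem splitOn_single (c : Char) (l : List Char) :
    PySem.Chars.splitOn l [c] = splitC c l := by
  show PySem.Chars.splitOn.go [c] (l.length + 1) l [] [] = _
  rw [splitOn_go_eq c (l.length + 1) l [] [] (by omega)]
  have hne := splitC_ne_nil c l
  cases hs : splitC c l with
  | nil => exact absurd hs hne
  | cons s ss => simp

theorem rpartU_none {l : List Char} (h : rpartU l = none) : '_' ∉ l := by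
  induction l with
  | nil => simp
  | cons a rest ih =>
    simp only [rpartU] at h
    cases hr : rpartU rest with
    | some p => rw [hr] at h; cases p; simp at h
    | none =>
      rw [hr] at h
      by_cases ha : a = '_'
      · simp [ha] at h
      · have := ih hr
        simp only [List.mem_cons, not_or]
        exact ⟨fun h2 => ha h2.symm, this⟩

theorem rpartU_some : ∀ {l : List Char} {h t : List Char},
    rpartU l = some (h, t) → l = h ++ '_' :: t ∧ '_' ∉ t := by
  intro l
  induction l with
  | nil => intro h t hyp; simp [rpartU] at hyp
  | cons a rest ih =>
    intro h t hyp
    simp only [rpartU] at hyp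
    cases hr : rpartU rest with
    | some p =>
      rw [hr] at hyp
      obtain ⟨h', t'⟩ := p
      simp only [Option.some.injEq, Prod.mk.injEq] at hyp
      obtain ⟨hh, ht⟩ := hyp
      obtain ⟨he, hm⟩ := ih hr
      subst ht; rw [← hh]; exact ⟨by simp [he], hm⟩
    | none =>
      rw [hr] at hyp
      by_cases ha : a = '_'
      · simp only [ha, if_pos] at hyp
        simp only [Option.some.injEq, Prod.mk.injEq] at hyp
        obtain ⟨hh, ht⟩ := hyp
        subst ht; rw [← hh]
        exact ⟨by simp [ha], rpartU_none hr⟩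
      · simp [ha] at hyp

theorem splitC_append (c : Char) (u v : List Char) :
    splitC c (u ++ c :: v) = splitC c u ++ splitC c v := by
  induction u with
  | nil =>
    have hne := splitC_ne_nil c v
    cases hs : splitC c v with
    | nil => exact absurd hs hne
    | cons s ss => simp [splitC, hs]
  | cons a u' ih =>
    by_cases ha : a = c
    · simp [splitC, ha, ih]
    · have hne := splitC_ne_nil c (u' ++ c :: v)
      have hne' := splitC_ne_nil c u'
      cases hs : splitC c u' with
      | nil => exact absurd hs hne'
      | cons s ss => simp [splitC, ha, ih, hs]

theorem splitC_no {c : Char} {l : List Char} (h : c ∉ l) : splitC c l = [l] := by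
  induction l with
  | nil => simp [splitC]
  | cons a rest ih =>
    have ha : a ≠ c := fun he => h (by simp [he])
    have := ih (fun hm => h (by simp [hm]))
    simp [splitC, ha, this]

-- the join the original loop performs on the non-last pieces
def joinC (xs : List (List Char)) : List Char :=
  match xs with
  | [] => []
  | s :: ss => s ++ ss.flatMap (fun t => '_' :: t)

theorem joinC_cons_of_ne_nil (s : List Char) {ss : List (List Char)}
    (h : ss ≠ []) : joinC (s :: ss) = s ++ '_' :: joinC ss := by
  cases ss with
  | nil => exact absurd rfl h
  | cons s' ss' => simp [joinC]

theorem joinC_splitC (l : List Char) : joinC (splitC '_' l) = l := by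
  induction l with
  | nil => simp [splitC, joinC]
  | cons a rest ih =>
    by_cases ha : a = '_'
    · rw [show splitC '_' (a :: rest) = [] :: splitC '_' rest by simp [splitC, ha]]
      rw [joinC_cons_of_ne_nil [] (splitC_ne_nil _ _)]
      simp [ih, ha]
    · have hne := splitC_ne_nil '_' rest
      cases hs : splitC '_' rest with
      | nil => exact absurd hs hne
      | cons s ss =>
        rw [hs] at ih
        rw [show splitC '_' (a :: rest) = (a :: s) :: ss by simp [splitC, ha, hs]]
        cases ss with
        | nil => simpa [joinC] using congrArg (a :: ·) ih
        | cons s' ss' =>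
          rw [joinC_cons_of_ne_nil (a :: s) (by simp),
            joinC_cons_of_ne_nil s (by simp)] at *
          simpa using ih

theorem joinC_concat (ys : List (List Char)) (y : List Char) :
    joinC (ys ++ [y]) = if ys = [] then y else joinC ys ++ '_' :: y := by
  induction ys with
  | nil => simp [joinC]
  | cons s ss ih =>
    rw [List.cons_append, joinC_cons_of_ne_nil s (by simp)]
    by_cases hss : ss = []
    · simp [hss, joinC]
    · rw [ih, if_neg hss, if_neg (by simp), joinC_cons_of_ne_nil s hss]
      simp

theorem join_fold (ys : List (List Char)) :
    (PySem.List.pyRange 0 (ys.length : Int) 1).foldl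
      (fun acc ii => if ii = 0 then acc ++ PySem.List.pyGetD ys ii []
        else acc ++ '_' :: PySem.List.pyGetD ys ii []) [] = joinC ys := by
  induction ys using List.reverseRecOn with
  | nil => simp [joinC, PySem.List.pyRange]
  | append_singleton ys y ih =>
    have hlen : ((ys ++ [y]).length : Int) = (ys.length : Int) + 1 := by
      simp
    rw [hlen, PySem.List.pyRange_one_succ_right (by positivity),
      List.foldl_append]
    have hcongr : ∀ (acc : List Char), ∀ ii ∈ PySem.List.pyRange 0 (ys.length : Int) 1,
        (if ii = 0 then acc ++ PySem.List.pyGetD (ys ++ [y]) ii []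
          else acc ++ '_' :: PySem.List.pyGetD (ys ++ [y]) ii []) =
        (if ii = 0 then acc ++ PySem.List.pyGetD ys ii []
          else acc ++ '_' :: PySem.List.pyGetD ys ii []) := by
      intro acc ii hii
      rw [PySem.List.mem_pyRange_one] at hii
      have hlt : ii < (((ys ++ [y]).length : Nat) : Int) := by
        rw [List.length_append]; push_cast; omega
      have hget : PySem.List.pyGetD (ys ++ [y]) ii [] = PySem.List.pyGetD ys ii [] := by
        rw [PySem.List.pyGetD_eq_getElem _ _ hii.1 hlt,
          PySem.List.pyGetD_eq_getElem _ _ hii.1 (by omega)]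
        rw [List.getElem_append_left (by omega)]
      rw [hget]
    rw [PySem.List.foldl_congr_mem _ _ _ _ hcongr, ih]
    simp only [List.foldl_cons, List.foldl_nil]
    have hgy : PySem.List.pyGetD (ys ++ [y]) (ys.length : Int) [] = y := by
      rw [PySem.List.pyGetD_eq_getElem _ _ (by positivity) (by simp)]
      simp
    by_cases hys : ys = []
    · subst hys
      simp only [List.nil_append] at hgy ⊢
      simp [joinC]
    · have h0 : ((ys.length : Int)) ≠ 0 := by
        simpa [List.length_eq_zero_iff] using hys
      rw [if_neg h0, hgy, joinC_concat, if_neg hys]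

theorem main_fold (xs : List (List Char)) (h : xs ≠ []) :
    (PySem.List.pyRange 0 (xs.length : Int) 1).foldl
      (fun acc ii => if ii = (xs.length : Int) - 1
          then acc ++ "_downloaded.".toList ++ PySem.List.pyGetD xs ii []
        else if ii = 0 then acc ++ PySem.List.pyGetD xs ii []
        else acc ++ '_' :: PySem.List.pyGetD xs ii []) [] =
      joinC xs.dropLast ++ "_downloaded.".toList ++ xs.getLast h := by
  induction xs using List.reverseRecOn with
  | nil => exact absurd rfl h
  | append_singleton ys y _ =>
    have hlen : ((ys ++ [y]).length : Int) = (ys.length : Int) + 1 := by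
      simp
    rw [hlen, PySem.List.pyRange_one_succ_right (by positivity),
      List.foldl_append]
    have hcongr : ∀ (acc : List Char), ∀ ii ∈ PySem.List.pyRange 0 (ys.length : Int) 1,
        (if ii = (ys.length : Int) + 1 - 1
            then acc ++ "_downloaded.".toList ++ PySem.List.pyGetD (ys ++ [y]) ii []
          else if ii = 0 then acc ++ PySem.List.pyGetD (ys ++ [y]) ii []
          else acc ++ '_' :: PySem.List.pyGetD (ys ++ [y]) ii []) =
        (if ii = 0 then acc ++ PySem.List.pyGetD ys ii []
          else acc ++ '_' :: PySem.List.pyGetD ys ii []) := by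
      intro acc ii hii
      rw [PySem.List.mem_pyRange_one] at hii
      have hlt : ii < (((ys ++ [y]).length : Nat) : Int) := by
        rw [List.length_append]; push_cast; omega
      have hget : PySem.List.pyGetD (ys ++ [y]) ii [] = PySem.List.pyGetD ys ii [] := by
        rw [PySem.List.pyGetD_eq_getElem _ _ hii.1 hlt,
          PySem.List.pyGetD_eq_getElem _ _ hii.1 (by omega)]
        rw [List.getElem_append_left (by omega)]
      rw [if_neg (by omega), hget]
    rw [PySem.List.foldl_congr_mem _ _ _ _ hcongr, join_fold]
    simp only [List.foldl_cons, List.foldl_nil]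
    have hgy : PySem.List.pyGetD (ys ++ [y]) ((ys.length : Int)) [] = y := by
      rw [PySem.List.pyGetD_eq_getElem _ _ (by positivity) (by simp)]
      simp
    have hc : (ys.length : Int) = (ys.length : Int) + 1 - 1 := by ring
    rw [if_pos hc, hgy, List.dropLast_concat]
    simp

theorem pySetD_neg_one {α : Type} (xs : List α) (v : α) (h : xs ≠ []) :
    PySem.List.pySetD xs (-1) v = xs.dropLast ++ [v] := by
  have hlen : 0 < xs.length := List.length_pos_iff.mpr h
  have hidx : PySem.List.pyIdx? xs.length (-1) = some (xs.length - 1) := by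
    simp [PySem.List.pyIdx?]
    omega
  simp only [PySem.List.pySetD, PySem.List.pySet?, hidx, Option.map_some, Option.getD_some]
  rw [List.set_eq_take_append_cons_drop]
  simp [hlen, List.dropLast_eq_take]
  omega

-- characterisation of split-at-last-underscore via rpartU
theorem split_rpartU (cs : List Char) :
    joinC ((splitC '_' cs).dropLast) =
      (match rpartU cs with | some (h, _) => h | none => ([] : List Char)) ∧
    (splitC '_' cs).getLast (splitC_ne_nil _ _) =
      (match rpartU cs with | some (_, t) => t | none => cs) := by
  cases hr : rpartU cs with
  | none =>
    have hs : splitC '_' cs = [cs] := splitC_no (rpartU_none hr)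
    simp [hs, joinC]
  | some p =>
    obtain ⟨h, t⟩ := p
    obtain ⟨he, hm⟩ := rpartU_some hr
    have hs : splitC '_' cs = splitC '_' h ++ [t] := by
      rw [he, splitC_append, splitC_no hm]
    have hne := splitC_ne_nil '_' h
    constructor
    · rw [hs, List.dropLast_concat, joinC_splitC h]
    · simp [hs, List.getLast_append_of_ne_nil]

-- ===== VERDICT (by name: the statement is the Claim_ definition above) =====
theorem del_enc_ext_spec : Claim_equal_del_enc_ext := by
  intro file _ _
  unfold Spec_del_enc_ext del_enc_ext del_enc_ext_alt
  set cs := file.toList with hcs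
  simp only [splitOn_single]
  have hne := splitC_ne_nil '_' cs
  have hlast : PySem.List.pyGetD (splitC '_' cs) (-1) [] =
      (splitC '_' cs).getLast hne := PySem.List.pyGetD_neg_one _ _ hne
  obtain ⟨hjoin, hgl⟩ := split_rpartU cs
  rw [hlast]
  rw [pySetD_neg_one _ _ hne]
  set e := PySem.List.pyGetD
      (splitC '.' ((splitC '_' cs).getLast hne)) 1 [] with he
  have hxs : (splitC '_' cs).dropLast ++ [e] ≠ [] := by simp
  rw [main_fold _ hxs]
  rw [show ((splitC '_' cs).dropLast ++ [e]).getLast hxs = e from List.getLast_append _]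
  rw [List.dropLast_concat]
  cases hr : rpartU cs with
  | none =>
    rw [hr] at hjoin hgl
    simp only [he, hjoin, hgl]
  | some p =>
    obtain ⟨h, t⟩ := p
    rw [hr] at hjoin hgl
    simp only [he, hjoin, hgl]
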